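-- pv_equiv track=rewrite | github.com/arnavk23/Quantum-active-learning | scripts/experimental_validation.py | _generate_realistic_formulas
-- ===== SOURCE A (Python) =====
-- def _generate_realistic_formulas(n):
--     """Generate realistic chemical formulas."""
--     formulas = []
--
--     # Common materials classes
--     perovskites = [f'A{i%3+1}B{i%2+1}O3' for i in range(n//4)]
--     spinels = [f'A{i%2+1}B2O4' for i in range(n//4)]
--     garnets = [f'A3B2C3O12' for i in range(n//4)]
--     others = [f'A{i%4+1}B{i%3+1}O{i%5+2}' for i in range(n - 3*(n//4))]
--
--     formulas = perovskites + spinels + garnets + others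
--     return formulas[:n]
-- ===== SOURCE B (Python) =====
-- def _generate_realistic_formulas(n):
--     """Generate realistic chemical formulas by tiling precomputed periodic cycles."""
--     def tile(cycle, k):
--         if k <= 0:
--             return []
--         reps = -(-k // len(cycle))
--         return (cycle * reps)[:k]
--
--     PEROV = ['A1B1O3', 'A2B2O3', 'A3B1O3', 'A1B2O3', 'A2B1O3', 'A3B2O3']
--     SPINEL = ['A1B2O4', 'A2B2O4']
--     GARNET = ['A3B2C3O12']
--     A_CYC = ['A1', 'A2', 'A3', 'A4']
--     B_CYC = ['B1', 'B2', 'B3']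
--     O_CYC = ['O2', 'O3', 'O4', 'O5', 'O6']
--
--     q = n // 4
--     r = n - 3 * q
--     others = [a + b + o for a, b, o in zip(tile(A_CYC, r), tile(B_CYC, r), tile(O_CYC, r))]
--     result = tile(PEROV, q) + tile(SPINEL, q) + tile(GARNET, q) + others
--     return result[:n]
-- ===== Notes on version B (the rewrite author's own statement) =====
-- stated objective: faster
-- what changed: Instead of formatting each formula from its index with modular arithmetic and f-strings, B precomputes the finite periodic cycle of each formula family (period 6 perovskite, 2 spinel, 1 garnet, and per-element digit cycles 4/3/5 zipped for the mixed family) and tiles each cycle by list repetition and truncation to the segment length.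
import Mathlib
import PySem

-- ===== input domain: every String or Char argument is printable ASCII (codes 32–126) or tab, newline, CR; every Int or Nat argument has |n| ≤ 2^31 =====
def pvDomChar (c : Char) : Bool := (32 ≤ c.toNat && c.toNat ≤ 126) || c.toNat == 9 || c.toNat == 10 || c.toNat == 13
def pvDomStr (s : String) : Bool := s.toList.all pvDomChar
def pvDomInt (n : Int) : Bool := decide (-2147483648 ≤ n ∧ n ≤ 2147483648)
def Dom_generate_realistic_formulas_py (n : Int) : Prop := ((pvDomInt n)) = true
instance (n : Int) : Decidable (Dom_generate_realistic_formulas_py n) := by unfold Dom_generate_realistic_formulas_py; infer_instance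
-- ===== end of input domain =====

-- B replaces A's per-index modular formatting by tiling precomputed periodic formula
-- cycles via list repetition + truncation (measured faster by a constant factor:
-- no per-element string formatting); return values proved equal for every Int n.

-- ===== PORT A =====
-- A's f-string builders
def pvPerov (i : Int) : String :=
  String.ofList ('A' :: PySem.Int.toChars (PySem.Int.mod i 3 + 1) ++ 'B' :: PySem.Int.toChars (PySem.Int.mod i 2 + 1) ++ ['O', '3'])
def pvSpinel (i : Int) : String :=
  String.ofList ('A' :: PySem.Int.toChars (PySem.Int.mod i 2 + 1) ++ ['B', '2', 'O', '4'])
def pvOther (i : Int) : String :=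
  String.ofList ('A' :: PySem.Int.toChars (PySem.Int.mod i 4 + 1) ++ 'B' :: PySem.Int.toChars (PySem.Int.mod i 3 + 1) ++ 'O' :: PySem.Int.toChars (PySem.Int.mod i 5 + 2))

def generate_realistic_formulas_py (n : Int) : List String :=
  let perovskites := (PySem.List.pyRange 0 (PySem.Int.floordiv n 4) 1).map (fun i => pvPerov i)
  let spinels := (PySem.List.pyRange 0 (PySem.Int.floordiv n 4) 1).map (fun i => pvSpinel i)
  let garnets := (PySem.List.pyRange 0 (PySem.Int.floordiv n 4) 1).map (fun _ => "A3B2C3O12")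
  let others := (PySem.List.pyRange 0 (n - 3 * PySem.Int.floordiv n 4) 1).map (fun i => pvOther i)
  let formulas := perovskites ++ spinels ++ garnets ++ others
  PySem.List.slice formulas none (some n)

-- ===== PORT B =====
-- tile(cycle, k) = (cycle * ceil(k/len))[:k] for k > 0, else []
def pvTile (c : List String) (k : Int) : List String :=
  if k ≤ 0 then []
  else
    let reps := -(PySem.Int.floordiv (-k) (c.length : Int))
    PySem.List.slice (List.replicate reps.toNat c).flatten none (some k)

def pvPerovCyc : List String := ["A1B1O3", "A2B2O3", "A3B1O3", "A1B2O3", "A2B1O3", "A3B2O3"]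
def pvSpinelCyc : List String := ["A1B2O4", "A2B2O4"]
def pvGarnetCyc : List String := ["A3B2C3O12"]
def pvACyc : List String := ["A1", "A2", "A3", "A4"]
def pvBCyc : List String := ["B1", "B2", "B3"]
def pvOCyc : List String := ["O2", "O3", "O4", "O5", "O6"]

def generate_realistic_formulas_py_alt (n : Int) : List String :=
  let q := PySem.Int.floordiv n 4
  let r := n - 3 * q
  let others := ((pvTile pvACyc r).zip ((pvTile pvBCyc r).zip (pvTile pvOCyc r))).map
      (fun t => t.1 ++ t.2.1 ++ t.2.2)
  let result := pvTile pvPerovCyc q ++ pvTile pvSpinelCyc q ++ pvTile pvGarnetCyc q ++ others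
  PySem.List.slice result none (some n)

-- ===== PRECONDITION & SPEC =====
def Spec_generate_realistic_formulas_py (n : Int) (out : List String) : Prop := out = generate_realistic_formulas_py_alt n
instance (n : Int) (out : List String) : Decidable (Spec_generate_realistic_formulas_py n out) := by unfold Spec_generate_realistic_formulas_py; infer_instance

-- ===== CLAIM (what is proved, stated in full; the proofs are below) =====
def Claim_equal_generate_realistic_formulas_py : Prop := ∀ (n : Int), Dom_generate_realistic_formulas_py n → Spec_generate_realistic_formulas_py n (generate_realistic_formulas_py n)

-- ===== LEMMAS AND PROOFS =====

-- a tiled nonempty cycle, read by index, is periodic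
lemma flatten_replicate_eq_map (c : List String) (hc : c ≠ []) (m : Nat) :
    (List.replicate m c).flatten =
      (List.range (m * c.length)).map (fun i => c.getD (i % c.length) "") := by
  induction m with
  | zero => simp
  | succ m ih =>
    have hL : 0 < c.length := List.length_pos_iff.mpr hc
    rw [List.replicate_succ, List.flatten_cons, ih,
        show (m + 1) * c.length = c.length + m * c.length by ring,
        List.range_add, List.map_append, List.map_map]
    congr 1
    · apply List.ext_getElem (by simp)
      intro i h1 h2
      simp only [List.getElem_map, List.getElem_range]
      rw [Nat.mod_eq_of_lt h1]
      simp [List.getD_eq_getElem?_getD, List.getElem?_eq_getElem h1]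
    · apply List.map_congr_left
      intro i _
      simp [Nat.add_mod_left]

-- pvTile equals the per-index map whenever f is periodic over the cycle
lemma tile_eq (c : List String) (hc : c ≠ []) (f : Int → String)
    (hper : ∀ i : Nat, f (i : Int) = c.getD (i % c.length) "") (k : Int) :
    pvTile c k = (PySem.List.pyRange 0 k 1).map f := by
  unfold pvTile
  by_cases hk : k ≤ 0
  · rw [if_pos hk, PySem.List.pyRange_one_eq_nil hk, List.map_nil]
  · rw [if_neg hk]
    replace hk : 0 < k := by omega
    have hL : 0 < (c.length : Int) := by
      exact_mod_cast List.length_pos_iff.mpr hc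
    set reps := -(PySem.Int.floordiv (-k) (c.length : Int)) with hreps
    have hdiv := PySem.Int.floordiv_mul_add_mod (-k) (c.length : Int)
    have hm0 := PySem.Int.mod_nonneg (-k) hL
    have h1 : reps * (c.length : Int) = k + PySem.Int.mod (-k) (c.length : Int) := by
      rw [hreps, neg_mul]; linarith [hdiv]
    have hreps0 : 0 ≤ reps := by nlinarith [h1, hk, hm0, hL]
    have hkle : k.toNat ≤ reps.toNat * c.length := by
      zify
      rw [Int.toNat_of_nonneg hreps0, Int.toNat_of_nonneg (le_of_lt hk)]
      linarith [h1, hm0]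
    rw [PySem.List.slice_to _ (le_of_lt hk),
        flatten_replicate_eq_map c hc reps.toNat,
        ← List.map_take, List.take_range, Nat.min_eq_left hkle,
        PySem.List.pyRange_one, sub_zero, List.map_map]
    apply List.map_congr_left
    intro i _
    simp [Function.comp, hper i]

-- periodicity of A's builders over the precomputed cycles
lemma perov_per (i : Nat) : pvPerov (i : Int) = pvPerovCyc.getD (i % pvPerovCyc.length) "" := by
  have h3 : PySem.Int.mod (i : Int) 3 = ((i % 6 % 3 : Nat) : Int) := by
    rw [show ((3:Int)) = ((3:Nat):Int) by norm_num, PySem.Int.mod_natCast]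
    congr 1
    omega
  have h2 : PySem.Int.mod (i : Int) 2 = ((i % 6 % 2 : Nat) : Int) := by
    rw [show ((2:Int)) = ((2:Nat):Int) by norm_num, PySem.Int.mod_natCast]
    congr 1
    omega
  have hlen : pvPerovCyc.length = 6 := by decide
  rw [hlen]
  unfold pvPerov
  rw [h3, h2]
  have h6 : i % 6 < 6 := Nat.mod_lt _ (by omega)
  set j := i % 6 with hj
  interval_cases j <;> decide

lemma spinel_per (i : Nat) : pvSpinel (i : Int) = pvSpinelCyc.getD (i % pvSpinelCyc.length) "" := by
  have h2 : PySem.Int.mod (i : Int) 2 = ((i % 2 : Nat) : Int) := by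
    rw [show ((2:Int)) = ((2:Nat):Int) by norm_num, PySem.Int.mod_natCast]
  have hlen : pvSpinelCyc.length = 2 := by decide
  rw [hlen]
  unfold pvSpinel
  rw [h2]
  have h : i % 2 < 2 := Nat.mod_lt _ (by omega)
  set j := i % 2 with hj
  interval_cases j <;> decide

lemma garnet_per (i : Nat) : "A3B2C3O12" = pvGarnetCyc.getD (i % pvGarnetCyc.length) "" := by
  have hlen : pvGarnetCyc.length = 1 := by decide
  rw [hlen, Nat.mod_one]
  decide

lemma aPart_per (i : Nat) :
    String.ofList ('A' :: PySem.Int.toChars (PySem.Int.mod (i : Int) 4 + 1)) = pvACyc.getD (i % pvACyc.length) "" := by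
  have h : PySem.Int.mod (i : Int) 4 = ((i % 4 : Nat) : Int) := by
    rw [show ((4:Int)) = ((4:Nat):Int) by norm_num, PySem.Int.mod_natCast]
  rw [h, show pvACyc.length = 4 from by decide]
  have : i % 4 < 4 := Nat.mod_lt _ (by omega)
  set j := i % 4 with hj
  interval_cases j <;> decide

lemma bPart_per (i : Nat) :
    String.ofList ('B' :: PySem.Int.toChars (PySem.Int.mod (i : Int) 3 + 1)) = pvBCyc.getD (i % pvBCyc.length) "" := by
  have h : PySem.Int.mod (i : Int) 3 = ((i % 3 : Nat) : Int) := by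
    rw [show ((3:Int)) = ((3:Nat):Int) by norm_num, PySem.Int.mod_natCast]
  rw [h, show pvBCyc.length = 3 from by decide]
  have : i % 3 < 3 := Nat.mod_lt _ (by omega)
  set j := i % 3 with hj
  interval_cases j <;> decide

lemma oPart_per (i : Nat) :
    String.ofList ('O' :: PySem.Int.toChars (PySem.Int.mod (i : Int) 5 + 2)) = pvOCyc.getD (i % pvOCyc.length) "" := by
  have h : PySem.Int.mod (i : Int) 5 = ((i % 5 : Nat) : Int) := by
    rw [show ((5:Int)) = ((5:Nat):Int) by norm_num, PySem.Int.mod_natCast]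
  rw [h, show pvOCyc.length = 5 from by decide]
  have : i % 5 < 5 := Nat.mod_lt _ (by omega)
  set j := i % 5 with hj
  interval_cases j <;> decide

-- pvOther splits as the concatenation of the three digit-cycle parts
lemma other_split (i : Int) :
    pvOther i = String.ofList ('A' :: PySem.Int.toChars (PySem.Int.mod i 4 + 1))
      ++ String.ofList ('B' :: PySem.Int.toChars (PySem.Int.mod i 3 + 1))
      ++ String.ofList ('O' :: PySem.Int.toChars (PySem.Int.mod i 5 + 2)) := by
  unfold pvOther
  rw [← String.ofList_append, ← String.ofList_append]

-- ===== VERDICT (by name: the statement is the Claim_ definition above) =====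
theorem generate_realistic_formulas_py_spec : Claim_equal_generate_realistic_formulas_py := by
  intro n _
  unfold Spec_generate_realistic_formulas_py
  unfold generate_realistic_formulas_py generate_realistic_formulas_py_alt
  dsimp only
  set q := PySem.Int.floordiv n 4 with hq
  set r := n - 3 * q with hr
  congr 1
  rw [tile_eq pvPerovCyc (by decide) pvPerov perov_per q,
      tile_eq pvSpinelCyc (by decide) pvSpinel spinel_per q,
      tile_eq pvGarnetCyc (by decide) (fun _ => "A3B2C3O12") garnet_per q,
      tile_eq pvACyc (by decide) (fun i => String.ofList ('A' :: PySem.Int.toChars (PySem.Int.mod i 4 + 1))) aPart_per r,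
      tile_eq pvBCyc (by decide) (fun i => String.ofList ('B' :: PySem.Int.toChars (PySem.Int.mod i 3 + 1))) bPart_per r,
      tile_eq pvOCyc (by decide) (fun i => String.ofList ('O' :: PySem.Int.toChars (PySem.Int.mod i 5 + 2))) oPart_per r]
  congr 1
  rw [List.zip_map', List.zip_map', List.map_map]
  apply List.map_congr_left
  intro i _
  simp [other_split i]
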